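-- pv_equiv track=rewrite | github.com/AshishBytes/ACC45DAYSOFCODE-2023 | Python/17_streaks_Intermediate.py | find_max_streak
-- ===== SOURCE A (Python) =====
-- def find_max_streak(N, om_solved, addy_solved):
--     om_streak = 0
--     addy_streak = 0
--     max_om_streak = 0
--     max_addy_streak = 0
--
--     for i in range(N):
--         if om_solved[i] > 0:
--             om_streak += 1
--         else:
--             om_streak = 0
--
--         if addy_solved[i] > 0:
--             addy_streak += 1
--         else:
--             addy_streak = 0
--
--         max_om_streak = max(max_om_streak, om_streak)
--         max_addy_streak = max(max_addy_streak, addy_streak)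
--
--     if max_om_streak > max_addy_streak:
--         return "OM"
--     elif max_addy_streak > max_om_streak:
--         return "ADDY"
--     else:
--         return "DRAW"
-- ===== SOURCE B (Python) =====
-- def max_positive_streak(seq, N):
--     # first N elements, raising IndexError exactly as indexing does
--     prefix = [seq[i] for i in range(N)]
--     # run-length grouping: groups[-1] is the current (sign, length) run
--     groups = []
--     for x in prefix:
--         if groups and groups[-1][0] == (x > 0):
--             groups[-1][1] += 1
--         else:
--             groups.append([x > 0, 1])
--     return max((n for positive, n in groups if positive), default=0)
--
--
-- def find_max_streak(N, om_solved, addy_solved):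
--     max_om_streak = max_positive_streak(om_solved, N)
--     max_addy_streak = max_positive_streak(addy_solved, N)
--     if max_om_streak > max_addy_streak:
--         return "OM"
--     elif max_addy_streak > max_om_streak:
--         return "ADDY"
--     else:
--         return "DRAW"
-- ===== Notes on version B (the rewrite author's own statement) =====
-- stated objective: idiomatic
-- what changed: Replaces the fused dual incremental-counter loop with a per-player helper that run-length-groups the first N entries and takes the max length of any positive run.
import Mathlib
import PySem

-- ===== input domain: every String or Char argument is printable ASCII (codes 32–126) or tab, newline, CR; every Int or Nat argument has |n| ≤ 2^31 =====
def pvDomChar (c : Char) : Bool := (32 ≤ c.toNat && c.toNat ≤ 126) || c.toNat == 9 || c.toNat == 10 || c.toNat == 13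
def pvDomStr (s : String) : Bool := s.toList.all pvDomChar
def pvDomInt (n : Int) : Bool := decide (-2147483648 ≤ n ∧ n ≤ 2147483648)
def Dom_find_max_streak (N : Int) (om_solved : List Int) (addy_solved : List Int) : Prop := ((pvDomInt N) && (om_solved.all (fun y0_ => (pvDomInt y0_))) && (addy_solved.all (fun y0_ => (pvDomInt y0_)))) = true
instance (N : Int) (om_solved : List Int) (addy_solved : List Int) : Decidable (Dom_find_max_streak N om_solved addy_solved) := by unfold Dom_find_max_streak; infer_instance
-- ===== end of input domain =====

-- B replaces A's fused dual incremental-counter loop by a per-player helper that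
-- run-length-groups the first N entries and takes the max length of any positive run (idiomatic decomposition, same cost).

-- ===== PORT A =====
def find_max_streak (N : Int) (om_solved : List Int) (addy_solved : List Int) : String :=
  -- state ((om_streak, max_om_streak), (addy_streak, max_addy_streak)); indices are valid under Pre_, so getD 0 is exact
  let r := (PySem.List.pyRange 0 N 1).foldl
    (fun (s : (Int × Int) × (Int × Int)) i =>
      let om_streak := if (PySem.List.pyGet? om_solved i).getD 0 > 0 then s.1.1 + 1 else 0
      let addy_streak := if (PySem.List.pyGet? addy_solved i).getD 0 > 0 then s.2.1 + 1 else 0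
      ((om_streak, max s.1.2 om_streak), (addy_streak, max s.2.2 addy_streak)))
    ((0, 0), (0, 0))
  if r.1.2 > r.2.2 then "OM" else if r.2.2 > r.1.2 then "ADDY" else "DRAW"

-- ===== PORT B =====
-- groups are kept most-recent-first (Python appends/updates the LAST group); the final max over
-- group lengths does not depend on the order, so this is the standard list transliteration.
def pvStepGroup (groups : List (Bool × Int)) (x : Int) : List (Bool × Int) :=
  match groups with
  | (k, n) :: rest =>
      if k = decide (x > 0) then (k, n + 1) :: rest
      else (decide (x > 0), 1) :: (k, n) :: rest
  | [] => [(decide (x > 0), 1)]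

def max_positive_streak (seq : List Int) (N : Int) : Int :=
  let pre := (PySem.List.pyRange 0 N 1).map (fun i => (PySem.List.pyGet? seq i).getD 0)
  let groups := pre.foldl pvStepGroup []
  match PySem.List.max? (groups.filterMap (fun g => if g.1 then some g.2 else none)) (fun y => y) with
  | some m => m
  | none => 0

def find_max_streak_alt (N : Int) (om_solved : List Int) (addy_solved : List Int) : String :=
  let max_om_streak := max_positive_streak om_solved N
  let max_addy_streak := max_positive_streak addy_solved N
  if max_om_streak > max_addy_streak then "OM"
  else if max_addy_streak > max_om_streak then "ADDY"
  else "DRAW"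

-- ===== PRECONDITION & SPEC =====
-- Pre_ excludes exactly the inputs where A raises IndexError: N exceeding the length of either list.
def Pre_find_max_streak (N : Int) (om_solved : List Int) (addy_solved : List Int) : Prop :=
  N ≤ 0 ∨ (N ≤ (om_solved.length : Int) ∧ N ≤ (addy_solved.length : Int))
instance (N : Int) (om_solved : List Int) (addy_solved : List Int) : Decidable (Pre_find_max_streak N om_solved addy_solved) := by unfold Pre_find_max_streak; infer_instance
def pvWitness_find_max_streak : Int × List Int × List Int := (3, [1, -2, 5], [0, 4, 4])

def Spec_find_max_streak (N : Int) (om_solved : List Int) (addy_solved : List Int) (out : String) : Prop := out = find_max_streak_alt N om_solved addy_solved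
instance (N : Int) (om_solved : List Int) (addy_solved : List Int) (out : String) : Decidable (Spec_find_max_streak N om_solved addy_solved out) := by unfold Spec_find_max_streak; infer_instance

-- ===== CLAIM (what is proved, stated in full; the proofs are below) =====
def Claim_equal_find_max_streak : Prop := ∀ (N : Int) (om_solved : List Int) (addy_solved : List Int), Dom_find_max_streak N om_solved addy_solved → Pre_find_max_streak N om_solved addy_solved → Spec_find_max_streak N om_solved addy_solved (find_max_streak N om_solved addy_solved)

-- ===== LEMMAS AND PROOFS =====

-- A's per-player counter step
def pvStepA (s : Int × Int) (x : Int) : Int × Int :=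
  let c := if x > 0 then s.1 + 1 else 0
  (c, max s.2 c)

-- current positive-run length read off the group list
def pvCurOf (g : List (Bool × Int)) : Int :=
  match g with
  | (true, n) :: _ => n
  | _ => 0

-- max positive-run length read off the group list
def pvMaxTrue (g : List (Bool × Int)) : Int :=
  g.foldr (fun p m => if p.1 then max p.2 m else m) 0

theorem pvMaxTrue_cons (k : Bool) (n : Int) (r : List (Bool × Int)) :
    pvMaxTrue ((k, n) :: r) = if k then max n (pvMaxTrue r) else pvMaxTrue r := rfl

theorem pvMaxTrue_nonneg (g : List (Bool × Int)) : 0 ≤ pvMaxTrue g := by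
  induction g with
  | nil => simp [pvMaxTrue]
  | cons p t ih =>
    obtain ⟨k, n⟩ := p
    rw [pvMaxTrue_cons]
    cases k <;> simp [max_def] <;> (try split_ifs) <;> omega

theorem pvStep_eq (g : List (Bool × Int)) (x : Int) :
    pvStepA (pvCurOf g, pvMaxTrue g) x = (pvCurOf (pvStepGroup g x), pvMaxTrue (pvStepGroup g x)) := by
  match g with
  | [] =>
    by_cases hx : x > 0 <;>
      simp [pvStepA, pvStepGroup, pvCurOf, pvMaxTrue, hx, max_def] <;> split_ifs <;> omega
  | (k, n) :: rest =>
    have hr := pvMaxTrue_nonneg rest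
    by_cases hx : x > 0 <;> cases k <;>
      simp [pvStepA, pvStepGroup, pvCurOf, pvMaxTrue_cons, hx, max_def] <;>
      (try split_ifs) <;> omega

theorem pvFold_eq (l : List Int) : ∀ g : List (Bool × Int),
    l.foldl pvStepA (pvCurOf g, pvMaxTrue g) =
      (pvCurOf (l.foldl pvStepGroup g), pvMaxTrue (l.foldl pvStepGroup g)) := by
  induction l with
  | nil => intro g; rfl
  | cons x t ih =>
    intro g
    simp only [List.foldl, pvStep_eq g x]
    exact ih (pvStepGroup g x)

-- splitting A's joint fold into the two independent per-player folds
theorem pvFoldl_pair {α : Type} (f g : (Int × Int) → α → (Int × Int)) (l : List α) :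
    ∀ (a b : Int × Int),
      l.foldl (fun s x => (f s.1 x, g s.2 x)) (a, b) = (l.foldl f a, l.foldl g b) := by
  induction l with
  | nil => intro a b; rfl
  | cons x t ih => intro a b; simp only [List.foldl]; exact ih _ _

theorem pvFoldr_max_swap (t : List Int) : ∀ a x : Int, t.foldr max (max a x) = max x (t.foldr max a) := by
  induction t with
  | nil => intro a x; exact max_comm a x
  | cons y u ih =>
    intro a x
    simp only [List.foldr, ih]
    exact max_left_comm y x (u.foldr max a)

theorem pvFoldl_max_eq_foldr (t : List Int) : ∀ a : Int, t.foldl max a = t.foldr max a := by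
  induction t with
  | nil => intro a; rfl
  | cons x u ih =>
    intro a
    simp only [List.foldl, List.foldr, ih, pvFoldr_max_swap]

theorem pvMaxD_eq_foldr (l : List Int) (h : ∀ y ∈ l, 0 < y) :
    (match PySem.List.max? l (fun y => y) with | some m => m | none => 0) = l.foldr max 0 := by
  match l with
  | [] => rfl
  | x :: t =>
    have hx : 0 < x := h x (by simp)
    simp only [PySem.List.max?_id_cons, pvFoldl_max_eq_foldr]
    have key : ∀ (u : List Int), u.foldr max x = max x (u.foldr max 0) := by
      intro u
      induction u with
      | nil => simp only [List.foldr, max_def]; split_ifs <;> omega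
      | cons y v ih =>
        simp only [List.foldr, ih]
        exact max_left_comm y x (v.foldr max 0)
    simp only [List.foldr]
    exact key t

theorem pvGroups_pos (l : List Int) : ∀ g : List (Bool × Int),
    (∀ p ∈ g, 0 < p.2) → ∀ p ∈ l.foldl pvStepGroup g, 0 < p.2 := by
  induction l with
  | nil => intro g hg; exact hg
  | cons x t ih =>
    intro g hg
    refine ih _ ?_
    intro p hp
    cases g with
    | nil =>
      have : p = (decide (x > 0), 1) := List.mem_singleton.mp hp
      subst this; norm_num
    | cons q rest =>
      obtain ⟨k, n⟩ := q
      have hn : (0 : Int) < n := hg (k, n) (by simp)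
      by_cases hk : k = decide (x > 0)
      · have hp' : p ∈ (k, n + 1) :: rest := by simpa [pvStepGroup, hk] using hp
        rcases List.mem_cons.mp hp' with h | h
        · subst h; show (0 : Int) < n + 1; omega
        · exact hg p (List.mem_cons_of_mem _ h)
      · have hp' : p ∈ (decide (x > 0), 1) :: (k, n) :: rest := by
          simpa [pvStepGroup, hk] using hp
        rcases List.mem_cons.mp hp' with h | h
        · subst h; norm_num
        · exact hg p h

theorem pvFoldr_filterMap_max (g : List (Bool × Int)) :
    (g.filterMap (fun p => if p.1 then some p.2 else none)).foldr max 0 = pvMaxTrue g := by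
  induction g with
  | nil => rfl
  | cons p t iht =>
    obtain ⟨k, n⟩ := p
    cases k <;> simp [pvMaxTrue_cons, iht]

-- B's helper value is pvMaxTrue of the groups (folded directly over the index range)
theorem pvMps_eq (seq : List Int) (N : Int) :
    max_positive_streak seq N =
      pvMaxTrue ((PySem.List.pyRange 0 N 1).foldl
        (fun g i => pvStepGroup g ((PySem.List.pyGet? seq i).getD 0)) []) := by
  unfold max_positive_streak
  have hpos : ∀ p ∈ ((PySem.List.pyRange 0 N 1).map
      (fun i => (PySem.List.pyGet? seq i).getD 0)).foldl pvStepGroup [], 0 < p.2 :=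
    pvGroups_pos _ [] (by simp)
  have hposf : ∀ y ∈ (((PySem.List.pyRange 0 N 1).map
      (fun i => (PySem.List.pyGet? seq i).getD 0)).foldl pvStepGroup []).filterMap
        (fun g => if g.1 then some g.2 else none), 0 < y := by
    intro y hy
    simp only [List.mem_filterMap] at hy
    obtain ⟨p, hp, he⟩ := hy
    by_cases h1 : p.1 <;> simp [h1] at he
    subst he; exact hpos p hp
  rw [pvMaxD_eq_foldr _ hposf, pvFoldr_filterMap_max, List.foldl_map]

-- per-player: A's counter fold computes B's helper value in its second component
theorem pvPlayer_eq (seq : List Int) (N : Int) :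
    ((PySem.List.pyRange 0 N 1).foldl
        (fun s i => pvStepA s ((PySem.List.pyGet? seq i).getD 0)) ((0 : Int), (0 : Int))).2
      = max_positive_streak seq N := by
  rw [pvMps_eq]
  have h1 := pvFold_eq ((PySem.List.pyRange 0 N 1).map
    (fun i => (PySem.List.pyGet? seq i).getD 0)) []
  simp only [List.foldl_map] at h1
  have h0 : ((0 : Int), (0 : Int)) = (pvCurOf [], pvMaxTrue []) := rfl
  rw [h0, h1]

-- ===== VERDICT (by name: the statement is the Claim_ definition above) =====
theorem find_max_streak_spec : Claim_equal_find_max_streak := by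
  intro N om ad _ _
  unfold Spec_find_max_streak find_max_streak find_max_streak_alt
  have hsplit : (PySem.List.pyRange 0 N 1).foldl
      (fun (s : (Int × Int) × (Int × Int)) i =>
        let om_streak := if (PySem.List.pyGet? om i).getD 0 > 0 then s.1.1 + 1 else 0
        let addy_streak := if (PySem.List.pyGet? ad i).getD 0 > 0 then s.2.1 + 1 else 0
        ((om_streak, max s.1.2 om_streak), (addy_streak, max s.2.2 addy_streak)))
      ((0, 0), (0, 0))
      = ((PySem.List.pyRange 0 N 1).foldl
          (fun s i => pvStepA s ((PySem.List.pyGet? om i).getD 0)) ((0 : Int), (0 : Int)),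
         (PySem.List.pyRange 0 N 1).foldl
          (fun s i => pvStepA s ((PySem.List.pyGet? ad i).getD 0)) ((0 : Int), (0 : Int))) :=
    pvFoldl_pair (fun s i => pvStepA s ((PySem.List.pyGet? om i).getD 0))
      (fun s i => pvStepA s ((PySem.List.pyGet? ad i).getD 0)) _ _ _
  rw [hsplit]
  dsimp only
  rw [pvPlayer_eq om N, pvPlayer_eq ad N]
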